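-- pv_equiv track=rewrite | github.com/buildbuddy-io/buildbuddy | app/tests/css_colors_test.py | parse_references
-- ===== SOURCE A (Python) =====
-- def parse_references(css):
--     """Parse var(--name) references from CSS."""
--     refs = set()
--     for line in css.splitlines():
--         i = 0
--         while True:
--             start = line.find('var(--', i)
--             if start == -1:
--                 break
--             start += 6  # len('var(--')
--             end = start
--             while end < len(line) and (line[end].isalnum() or line[end] == '-'):
--                 end += 1
--             if end > start:
--                 refs.add(line[start:end])
--             i = end
--     return refs
-- ===== SOURCE B (Python) =====
-- def parse_references(css):
--     """Parse var(--name) references from CSS (single linear scan, no line splitting)."""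
--     refs = set()
--     i = 0
--     n = len(css)
--     while i < n:
--         if css.startswith('var(--', i):
--             j = i + 6
--             k = j
--             while k < n and (css[k].isalnum() or css[k] == '-'):
--                 k += 1
--             if k > j:
--                 refs.add(css[j:k])
--                 i = k
--             else:
--                 i += 1
--         else:
--             i += 1
--     return refs
-- ===== Notes on version B (the rewrite author's own statement) =====
-- stated objective: simpler
-- what changed: A splits the CSS into lines and repeatedly jumps ahead with str.find for the six-character reference prefix inside each line; B makes one linear left-to-right pass over the whole string testing startswith at each position (line splitting is unnecessary since name characters cannot include a newline), collecting the same name runs into a set.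
import Mathlib
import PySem

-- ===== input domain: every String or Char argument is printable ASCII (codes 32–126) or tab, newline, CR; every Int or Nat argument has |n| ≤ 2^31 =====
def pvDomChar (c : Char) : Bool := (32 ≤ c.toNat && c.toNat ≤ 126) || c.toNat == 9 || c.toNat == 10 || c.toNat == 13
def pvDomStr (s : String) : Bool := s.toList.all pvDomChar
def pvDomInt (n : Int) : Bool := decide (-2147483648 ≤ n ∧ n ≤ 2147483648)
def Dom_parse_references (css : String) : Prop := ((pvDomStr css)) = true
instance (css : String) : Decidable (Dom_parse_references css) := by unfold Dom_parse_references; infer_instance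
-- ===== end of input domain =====

-- B replaces A's per-line `str.find` jumping with one linear left-to-right scan of the whole
-- string (names cannot contain a newline, so line splitting is unnecessary); objective: simpler.

-- the character test `c.isalnum() or c == '-'` shared verbatim by both Pythons
def pvIsName (c : Char) : Bool := PySem.Chars.isalnum c || c == '-'

-- the six-character reference prefix searched for by both Pythons
def pvPat : List Char := ['v', 'a', 'r', '(', '-', '-']

-- ===== PORT A =====
-- inner `while end < len(line) and (line[end].isalnum() or line[end] == '-'): end += 1`
def pvScanEnd (cs : List Char) (e : Nat) : Nat :=
  if h : e < cs.length then
    if pvIsName cs[e] then pvScanEnd cs (e + 1) else e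
  else e
termination_by cs.length - e

theorem pvScanEnd_ge (cs : List Char) (e : Nat) : e ≤ pvScanEnd cs e := by
  unfold pvScanEnd
  split
  · split
    · exact le_trans (Nat.le_succ e) (pvScanEnd_ge cs (e + 1))
    · exact le_refl e
  · exact le_refl e
termination_by cs.length - e

theorem pvScanEnd_le (cs : List Char) (e : Nat) (he : e ≤ cs.length) :
    pvScanEnd cs e ≤ cs.length := by
  unfold pvScanEnd
  split
  · split
    · exact pvScanEnd_le cs (e + 1) (by omega)
    · exact he
  · exact he
termination_by cs.length - e

-- the `while True` loop of A on one line, threading the `refs` set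
def pvLineLoop (cs : List Char) (i : Nat) (hi : i ≤ cs.length) (refs : PySem.Set String) :
    PySem.Set String :=
  let start := PySem.Chars.findFrom cs pvPat (i : Int) none
  if hs : start = -1 then refs
  else
    have spec := PySem.Chars.findFrom_natCast_spec cs pvPat i hi hs
    have hpat : pvPat <+: cs.drop start.toNat := spec.2.1
    have h6 : start.toNat + 6 ≤ cs.length := by
      have := hpat.length_le
      simp [pvPat] at this
      omega
    let s := start.toNat + 6
    let e := pvScanEnd cs s
    let refs' :=
      if s < e then
        PySem.Set.add refs (String.ofList (PySem.List.slice cs (some (s : Int)) (some (e : Int))))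
      else refs
    pvLineLoop cs e (pvScanEnd_le cs s h6) refs'
termination_by cs.length - i
decreasing_by
  have h2 : start.toNat + 6 ≤ pvScanEnd cs (start.toNat + 6) := pvScanEnd_ge cs _
  have h3 : pvScanEnd cs (start.toNat + 6) ≤ cs.length := pvScanEnd_le cs _ h6
  have h5 : i ≤ start.toNat := by
    have _h1 : (i : Int) ≤ PySem.Chars.findFrom cs pvPat (i : Int) none := spec.1
    omega
  show cs.length - pvScanEnd cs (start.toNat + 6) < cs.length - i
  omega

def parse_references (css : String) : List String :=
  (PySem.Str.splitlines css).foldl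
    (fun refs line => pvLineLoop line.toList 0 (Nat.zero_le _) refs) PySem.Set.empty

-- ===== PORT B =====
-- B's single `while i < n` scan: startswith at i, then the name-character run
def pvScanB (cs : List Char) : List (List Char) :=
  match cs with
  | [] => []
  | c :: t =>
    if pvPat <+: (c :: t) then
      let name := (t.drop 5).takeWhile pvIsName
      if name.isEmpty then pvScanB t
      else name :: pvScanB ((t.drop 5).drop name.length)
    else pvScanB t
termination_by cs.length
decreasing_by
  all_goals simp

def parse_references_alt (css : String) : List String :=
  PySem.Set.ofList ((pvScanB css.toList).map String.ofList)

-- ===== PRECONDITION & SPEC =====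
def Spec_parse_references (css : String) (out : List String) : Prop := out = parse_references_alt css
instance (css : String) (out : List String) : Decidable (Spec_parse_references css out) := by unfold Spec_parse_references; infer_instance

-- ===== CLAIM (what is proved, stated in full; the proofs are below) =====
def Claim_equal_parse_references : Prop := ∀ (css : String), Dom_parse_references css → Spec_parse_references css (parse_references css)

-- ===== LEMMAS AND PROOFS =====

-- if the reference prefix occurs nowhere in l, B's scan yields nothing
theorem pvScanB_nil_of_not_infix (l : List Char) (h : ¬ pvPat <:+: l) : pvScanB l = [] := by
  induction l with
  | nil => simp [pvScanB]
  | cons c t ih =>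
    rw [pvScanB]
    rw [if_neg (fun hp => h hp.isInfix)]
    exact ih (fun hi => h (hi.trans (List.suffix_cons c t).isInfix))

-- B's scan skips positions where no reference prefix starts
theorem pvScanB_drop (d : Nat) : ∀ (l : List Char),
    (∀ m < d, ¬ pvPat <+: l.drop m) → pvScanB l = pvScanB (l.drop d) := by
  induction d with
  | zero => intro l _; rfl
  | succ d ih =>
    intro l hl
    match l with
    | [] => simp [pvScanB]
    | c :: t =>
      have h0 : ¬ pvPat <+: (c :: t) := by simpa using hl 0 (Nat.succ_pos d)
      rw [pvScanB, if_neg h0]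
      have := ih t (fun m hm => by simpa using hl (m + 1) (by omega))
      simpa using this

theorem pvTake_takeWhile (p : Char → Bool) : ∀ (l : List Char),
    l.take ((l.takeWhile p).length) = l.takeWhile p := by
  intro l
  induction l with
  | nil => rfl
  | cons c t ih =>
    by_cases hc : p c
    · simp [hc, ih]
    · simp [hc]

-- the inner while-loop of A computes the length of the name-character run
theorem pvScanEnd_eq (cs : List Char) (e : Nat) :
    pvScanEnd cs e = e + ((cs.drop e).takeWhile pvIsName).length := by
  unfold pvScanEnd
  split
  · rename_i h
    have hdrop : cs.drop e = cs[e] :: cs.drop (e + 1) := List.drop_eq_getElem_cons h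
    split
    · rename_i hname
      rw [pvScanEnd_eq cs (e + 1), hdrop, List.takeWhile_cons, if_pos hname]
      simp; omega
    · rename_i hname
      rw [hdrop, List.takeWhile_cons, if_neg hname]
      simp
  · rename_i h
    rw [List.drop_eq_nil_of_le (by omega)]
    simp
termination_by cs.length - e

-- the reference prefix cannot start at offsets 1..5 inside an occurrence of itself
theorem pvNoOverlap (l : List Char) (h : pvPat <+: l) (m : Nat) (h1 : 1 ≤ m) (h5 : m ≤ 5) :
    ¬ pvPat <+: l.drop m := by
  obtain ⟨rest, hrest⟩ := h
  subst hrest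
  interval_cases m <;> simp [pvPat, List.cons_prefix_cons]

-- A's line loop = fold of B's scan over the names found in the suffix
-- B's scan at an occurrence of the pattern: emit the name run (if nonempty) and continue after it
theorem pvScanB_at_pat (rest : List Char) :
    pvScanB (pvPat ++ rest) =
      (if (rest.takeWhile pvIsName).isEmpty then
        pvScanB ('a' :: 'r' :: '(' :: '-' :: '-' :: rest)
      else (rest.takeWhile pvIsName) :: pvScanB (rest.drop (rest.takeWhile pvIsName).length)) := by
  show pvScanB ('v' :: 'a' :: 'r' :: '(' :: '-' :: '-' :: rest) = _
  rw [pvScanB]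
  have hp : pvPat <+: 'v' :: 'a' :: 'r' :: '(' :: '-' :: '-' :: rest := List.prefix_append pvPat rest
  rw [if_pos hp]
  rfl

theorem pvLineLoop_eq (cs : List Char) (i : Nat) (hi : i ≤ cs.length) (refs : PySem.Set String) :
    pvLineLoop cs i hi refs = ((pvScanB (cs.drop i)).map String.ofList).foldl PySem.Set.add refs := by
  rw [pvLineLoop]
  by_cases hs : PySem.Chars.findFrom cs pvPat (i : Int) none = -1
  · rw [dif_pos hs]
    rw [pvScanB_nil_of_not_infix _ ((PySem.Chars.findFrom_natCast_eq_neg_one_iff cs pvPat i hi).mp hs)]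
    rfl
  · rw [dif_neg hs]
    have spec := PySem.Chars.findFrom_natCast_spec cs pvPat i hi hs
    have hJi : (i : Int) ≤ PySem.Chars.findFrom cs pvPat (i : Int) none := spec.1
    set J := (PySem.Chars.findFrom cs pvPat (i : Int) none).toNat with hJ
    have hiJ : i ≤ J := by omega
    have hpat : pvPat <+: cs.drop J := spec.2.1
    obtain ⟨rest, hrest⟩ := hpat
    have h6 : J + 6 ≤ cs.length := by
      have h1 := congrArg List.length hrest
      have h2 : (cs.drop J).length = cs.length - J := List.length_drop
      simp [pvPat] at h1
      omega
    have hdropJ : cs.drop J = pvPat ++ rest := hrest.symm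
    have hdrop6 : cs.drop (J + 6) = rest := by
      rw [← List.drop_drop, hdropJ]
      rfl
    have hskip : pvScanB (cs.drop i) = pvScanB (cs.drop J) := by
      have hc : ∀ m < J - i, ¬ pvPat <+: (cs.drop i).drop m := by
        intro m hm
        rw [List.drop_drop]
        exact spec.2.2 (i + m) (by omega) (by omega)
      have h := pvScanB_drop (J - i) (cs.drop i) hc
      rw [List.drop_drop, (show i + (J - i) = J by omega)] at h
      exact h
    have hE : pvScanEnd cs (J + 6) = (J + 6) + (rest.takeWhile pvIsName).length := by
      rw [pvScanEnd_eq, hdrop6]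
    show pvLineLoop cs (pvScanEnd cs (J + 6)) (pvScanEnd_le cs _ h6)
        (if (J + 6) < pvScanEnd cs (J + 6) then
          PySem.Set.add refs (String.ofList (PySem.List.slice cs
            (some ((J + 6 : Nat) : Int)) (some ((pvScanEnd cs (J + 6) : Nat) : Int))))
        else refs) = _
    conv_rhs => rw [hskip, hdropJ, pvScanB_at_pat]
    by_cases hname : (rest.takeWhile pvIsName).isEmpty
    · -- empty name run: A recurses at end = start + 6 with refs unchanged
      rw [if_pos hname]
      have hlen0 : (rest.takeWhile pvIsName).length = 0 := by
        simpa [List.isEmpty_iff] using hname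
      have hnolt : ¬ (J + 6 < pvScanEnd cs (J + 6)) := by rw [hE]; omega
      rw [if_neg hnolt]
      have htail : pvScanB ('a' :: 'r' :: '(' :: '-' :: '-' :: rest) = pvScanB (cs.drop (J + 6)) := by
        have hc : ∀ m < 5, ¬ pvPat <+: ('a' :: 'r' :: '(' :: '-' :: '-' :: rest).drop m := by
          intro m hm
          have h1 : pvPat <+: pvPat ++ rest := List.prefix_append _ _
          have := pvNoOverlap (pvPat ++ rest) h1 (m + 1) (by omega) (by omega)
          simpa [pvPat] using this
        have h := pvScanB_drop 5 ('a' :: 'r' :: '(' :: '-' :: '-' :: rest) hc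
        rw [hdrop6, h]
        simp
      rw [htail]
      have := pvLineLoop_eq cs (pvScanEnd cs (J + 6)) (pvScanEnd_le cs _ h6) refs
      rw [this, hE, hlen0]
    · -- nonempty name run: A adds the slice, B conses the takeWhile run
      rw [if_neg hname]
      have hlenpos : 0 < (rest.takeWhile pvIsName).length := by
        cases h : rest.takeWhile pvIsName with
        | nil => rw [h] at hname; simp at hname
        | cons a t => simp
      have hlt : J + 6 < pvScanEnd cs (J + 6) := by rw [hE]; omega
      rw [if_pos hlt]
      have hslice : PySem.List.slice cs (some ((J + 6 : Nat) : Int))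
          (some ((pvScanEnd cs (J + 6) : Nat) : Int)) = rest.takeWhile pvIsName := by
        rw [hE, PySem.List.slice_natCast, hdrop6]
        rw [(show J + 6 + (rest.takeWhile pvIsName).length - (J + 6)
            = (rest.takeWhile pvIsName).length by omega)]
        exact pvTake_takeWhile pvIsName rest
      have hdropE : cs.drop (pvScanEnd cs (J + 6)) = rest.drop (rest.takeWhile pvIsName).length := by
        rw [hE, ← List.drop_drop, hdrop6]
      have := pvLineLoop_eq cs (pvScanEnd cs (J + 6)) (pvScanEnd_le cs _ h6)
        (PySem.Set.add refs (String.ofList (PySem.List.slice cs (some ((J + 6 : Nat) : Int))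
          (some ((pvScanEnd cs (J + 6) : Nat) : Int)))))
      rw [this, hdropE, hslice]
      simp
termination_by cs.length - i
decreasing_by
  all_goals
    show cs.length - pvScanEnd cs (J + 6) < cs.length - i
    have := pvScanEnd_le cs (J + 6) h6
    have := pvScanEnd_ge cs (J + 6)
    omega

-- a line-break character starts no pattern and is no name character
theorem pvBreakFacts (b : Char) (hb : b = '\n' ∨ b = '\r') :
    pvIsName b = false ∧ ∀ j, (h : j < pvPat.length) → pvPat[j] ≠ b := by
  rcases hb with h | h <;> subst h <;>
    refine ⟨by decide, ?_⟩ <;> intro j hj <;>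
    · simp [pvPat] at hj
      interval_cases j <;> simp [pvPat]

theorem pvScanB_break_cons (b : Char) (hb : b = '\n' ∨ b = '\r') (ys : List Char) :
    pvScanB (b :: ys) = pvScanB ys := by
  rw [pvScanB]
  rw [if_neg]
  intro hp
  have h0 := hp.getElem (i := 0) (by simp [pvPat])
  have hne := (pvBreakFacts b hb).2 0 (by simp [pvPat])
  simp at h0
  exact hne (by rw [h0])

-- B's scan distributes over a line break
theorem pvScanB_append_break (b : Char) (hb : b = '\n' ∨ b = '\r') :
    ∀ (n : Nat) (xs ys : List Char), xs.length ≤ n →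
    pvScanB (xs ++ b :: ys) = pvScanB xs ++ pvScanB ys := by
  intro n
  induction n with
  | zero =>
    intro xs ys hlen
    have : xs = [] := List.eq_nil_of_length_eq_zero (by omega)
    subst this
    simp [pvScanB_break_cons b hb, pvScanB]
  | succ n ih =>
    intro xs ys hlen
    match xs with
    | [] => simp [pvScanB_break_cons b hb, pvScanB]
    | c :: t =>
      rw [List.cons_append]
      by_cases hp : pvPat <+: (c :: t)
      · -- a full pattern occurrence inside xs
        have h6 : 6 ≤ (c :: t).length := by
          have := hp.length_le
          simpa [pvPat] using this
        have h5 : 5 ≤ t.length := by simpa using h6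
        have hpfull : pvPat <+: c :: (t ++ b :: ys) := by
          have := hp.trans (List.prefix_append (c :: t) (b :: ys))
          rwa [List.cons_append] at this
        rw [pvScanB, if_pos hpfull]
        conv_rhs => rw [pvScanB, if_pos hp]
        have hdrop5 : (t ++ b :: ys).drop 5 = t.drop 5 ++ b :: ys :=
          List.drop_append_of_le_length h5
        have hname : (t.drop 5 ++ b :: ys).takeWhile pvIsName = (t.drop 5).takeWhile pvIsName := by
          rw [List.takeWhile_append]
          split
          · rename_i hall
            have heq : (t.drop 5).takeWhile pvIsName = t.drop 5 :=
              (List.takeWhile_prefix pvIsName).eq_of_length hall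
            rw [heq, List.takeWhile_cons, (pvBreakFacts b hb).1]
            simp
          · rfl
        rw [hdrop5, hname]
        by_cases hemp : ((t.drop 5).takeWhile pvIsName).isEmpty
        · rw [if_pos hemp, if_pos hemp]
          exact ih t ys (by simpa using hlen)
        · rw [if_neg hemp, if_neg hemp]
          have hle : ((t.drop 5).takeWhile pvIsName).length ≤ (t.drop 5).length :=
            (List.takeWhile_prefix pvIsName).length_le
          rw [List.drop_append_of_le_length hle]
          have ht : t.length ≤ n := by simpa using hlen
          rw [ih ((t.drop 5).drop ((t.drop 5).takeWhile pvIsName).length) ys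
            (by simp; omega)]
          simp
      · -- no pattern at this position on either side
        have hpf : ¬ pvPat <+: c :: (t ++ b :: ys) := by
          intro hpf
          rw [← List.cons_append] at hpf
          by_cases h6 : 6 ≤ (c :: t).length
          · apply hp
            have htake : pvPat = ((c :: t) ++ b :: ys).take 6 := by
              have := List.prefix_iff_eq_take.mp hpf
              simpa [pvPat] using this
            rw [List.take_append_of_le_length h6] at htake
            rw [htake]
            exact List.take_prefix 6 (c :: t)
          · have hlt : (c :: t).length < pvPat.length := by
              simp at h6
              simp [pvPat]
              omega
            have hgetb : ((c :: t) ++ b :: ys)[(c :: t).length]'(by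
                simp) = b := by
              rw [List.getElem_append_right (by omega)]
              simp
            have := hpf.getElem (i := (c :: t).length) hlt
            exact (pvBreakFacts b hb).2 (c :: t).length hlt (this.trans hgetb)
        rw [pvScanB, if_neg hpf]
        conv_rhs => rw [pvScanB, if_neg hp]
        exact ih t ys (by simpa using hlen)

theorem pvScanB_nilEq : pvScanB [] = [] := by simp [pvScanB]

-- a domain character that the splitlines break test accepts is '\n' or '\r'
theorem pvBreakChar10or13 (c : Char) (hDc : pvDomChar c = true)
    (hc : (decide (c.toNat = 10) || decide (c.toNat = 13) || decide (c.toNat = 11) ||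
      decide (c.toNat = 12) || decide (c.toNat = 28) || decide (c.toNat = 29) ||
      decide (c.toNat = 30) || decide (c.toNat = 133) || decide (c.toNat = 8232) ||
      decide (c.toNat = 8233)) = true) : c = '\n' ∨ c = '\r' := by
  have h1013 : c.toNat = 10 ∨ c.toNat = 13 := by
    simp [pvDomChar] at hDc
    simp at hc
    omega
  rcases h1013 with h | h
  · left
    have := Char.ofNat_toNat c
    rw [h] at this
    exact this.symm
  · right
    have := Char.ofNat_toNat c
    rw [h] at this
    exact this.symm

-- splitlines invariant under the ASCII domain
theorem pvGoFuel (n : Nat) : ∀ (cs : List Char), cs.length ≤ n → cs.all pvDomChar = true →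
    ∀ (cur : List Char) (acc : List (List Char)),
    (PySem.Chars.splitlines.go
      (fun c =>
        have n := c.toNat;
        decide (n = 10) || decide (n = 13) || decide (n = 11) || decide (n = 12) ||
          decide (n = 28) || decide (n = 29) || decide (n = 30) || decide (n = 133) ||
          decide (n = 8232) || decide (n = 8233)) cs cur acc).flatMap pvScanB =
      acc.reverse.flatMap pvScanB ++ pvScanB (cur.reverse ++ cs) := by
  induction n with
  | zero =>
    intro cs hlen hD cur acc
    rw [PySem.Chars.splitlines.go.eq_def]
    split
    · -- end of input: flush the current line
      by_cases hcur : cur.isEmpty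
      · rw [if_pos hcur]
        have hnil : cur = [] := by simpa [List.isEmpty_iff] using hcur
        simp [hnil, pvScanB_nilEq]
      · rw [if_neg hcur]
        simp
    · simp at hlen
    · simp at hlen
  | succ n ih =>
    intro cs hlen hD cur acc
    rw [PySem.Chars.splitlines.go.eq_def]
    split
    · -- end of input: flush the current line
      by_cases hcur : cur.isEmpty
      · rw [if_pos hcur]
        have hnil : cur = [] := by simpa [List.isEmpty_iff] using hcur
        simp [hnil, pvScanB_nilEq]
      · rw [if_neg hcur]
        simp
    · -- a '\r\n' break: flush the current line, continue with an empty one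
      rename_i rest
      have hD' : rest.all pvDomChar = true := by
        simp only [List.all_cons, Bool.and_eq_true] at hD
        exact hD.2.2
      rw [ih rest (by simp at hlen; omega) hD' [] (cur.reverse :: acc)]
      rw [pvScanB_append_break '\x0d' (Or.inr rfl) cur.reverse.length cur.reverse ('\n' :: rest) le_rfl]
      rw [pvScanB_break_cons '\n' (Or.inl rfl) rest]
      simp
    · -- any other character
      rename_i c rest hne
      have hDc : pvDomChar c = true := by
        simp only [List.all_cons, Bool.and_eq_true] at hD
        exact hD.1
      have hD' : rest.all pvDomChar = true := by
        simp only [List.all_cons, Bool.and_eq_true] at hD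
        exact hD.2
      split
      · -- a line break: flush
        rename_i hc
        have hb : c = '\n' ∨ c = '\r' := pvBreakChar10or13 c hDc hc
        rw [ih rest (by simp at hlen; omega) hD' [] (cur.reverse :: acc)]
        rw [pvScanB_append_break c hb cur.reverse.length cur.reverse rest le_rfl]
        simp
      · -- an ordinary character joins the current line
        rw [ih rest (by simp at hlen; omega) hD' (c :: cur) acc]
        simp

theorem pvGo (cs : List Char) (hD : cs.all pvDomChar = true) :
    ∀ (cur : List Char) (acc : List (List Char)),
    (PySem.Chars.splitlines.go
      (fun c =>
        have n := c.toNat;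
        decide (n = 10) || decide (n = 13) || decide (n = 11) || decide (n = 12) ||
          decide (n = 28) || decide (n = 29) || decide (n = 30) || decide (n = 133) ||
          decide (n = 8232) || decide (n = 8233)) cs cur acc).flatMap pvScanB =
      acc.reverse.flatMap pvScanB ++ pvScanB (cur.reverse ++ cs) :=
  pvGoFuel cs.length cs le_rfl hD

theorem pvSplit (cs : List Char) (hD : cs.all pvDomChar = true) :
    (PySem.Chars.splitlines cs).flatMap pvScanB = pvScanB cs := by
  have := pvGo cs hD [] []
  simpa [PySem.Chars.splitlines] using this

theorem pvFoldlines : ∀ (L : List String) (s : PySem.Set String),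
    L.foldl (fun refs line => ((pvScanB line.toList).map String.ofList).foldl PySem.Set.add refs) s
      = ((L.flatMap (fun line => pvScanB line.toList)).map String.ofList).foldl PySem.Set.add s := by
  intro L
  induction L with
  | nil => intro s; rfl
  | cons l L ih => intro s; simp [List.foldl_append, ih]

-- ===== VERDICT (by name: the statement is the Claim_ definition above) =====
theorem parse_references_spec : Claim_equal_parse_references := by
  intro css hD
  unfold Spec_parse_references parse_references parse_references_alt
  have hlines : (PySem.Str.splitlines css).map String.toList = PySem.Chars.splitlines css.toList := by
    simp
  calc (PySem.Str.splitlines css).foldl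
        (fun refs line => pvLineLoop line.toList 0 (Nat.zero_le _) refs) PySem.Set.empty
      = (PySem.Str.splitlines css).foldl
        (fun refs line => ((pvScanB line.toList).map String.ofList).foldl PySem.Set.add refs)
        PySem.Set.empty := by
        apply List.foldl_ext
        intro a b _
        rw [pvLineLoop_eq]
        simp
    _ = (((PySem.Str.splitlines css).flatMap (fun line => pvScanB line.toList)).map
          String.ofList).foldl PySem.Set.add PySem.Set.empty := pvFoldlines _ _
    _ = PySem.Set.ofList ((pvScanB css.toList).map String.ofList) := by
        have : (PySem.Str.splitlines css).flatMap (fun line => pvScanB line.toList)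
            = pvScanB css.toList := by
          conv_rhs => rw [← pvSplit css.toList (by exact hD), ← hlines]
          simp only [List.flatMap_def, List.map_map]
          rfl
        rw [this, PySem.Set.ofList_eq_foldl]
        rfl
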